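-- pv_equiv track=rewrite | github.com/AgadoKodaka/ESP32_Indoor_Naviagtion | server/astar/core.py | nearest_point_mapping
-- ===== SOURCE A (Python) =====
-- def distance(x, y):
--     return (x[0] - y[0])**2 + (x[1] - y[1])**2
--
-- def nearest_point_mapping(point_location, main_points):
--     point_keys = []
--     point_dis = []
--     for point, point_data in main_points.items():
--         location = point_data['location']
--         dis = distance(location, point_location)
--
--         point_keys.append(point)
--         point_dis.append(dis)
--
--     idx = point_dis.index(min(point_dis))
--     return point_keys[idx]
-- ===== SOURCE B (Python) =====
-- def distance(x, y):
--     return (x[0] - y[0])**2 + (x[1] - y[1])**2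
--
-- def nearest_point_mapping(point_location, main_points):
--     best_key = None
--     best_dis = None
--     for point, point_data in main_points.items():
--         dis = distance(point_data['location'], point_location)
--         if best_dis is None or dis < best_dis:
--             best_key, best_dis = point, dis
--     return best_key
-- ===== Notes on version B (the rewrite author's own statement) =====
-- stated objective: simpler
-- what changed: Replaced the build-two-parallel-lists then min() plus list.index() plus indexing scheme by a single pass that maintains only the running best (key, distance), keeping first-minimum tie-breaking.
import Mathlib
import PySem

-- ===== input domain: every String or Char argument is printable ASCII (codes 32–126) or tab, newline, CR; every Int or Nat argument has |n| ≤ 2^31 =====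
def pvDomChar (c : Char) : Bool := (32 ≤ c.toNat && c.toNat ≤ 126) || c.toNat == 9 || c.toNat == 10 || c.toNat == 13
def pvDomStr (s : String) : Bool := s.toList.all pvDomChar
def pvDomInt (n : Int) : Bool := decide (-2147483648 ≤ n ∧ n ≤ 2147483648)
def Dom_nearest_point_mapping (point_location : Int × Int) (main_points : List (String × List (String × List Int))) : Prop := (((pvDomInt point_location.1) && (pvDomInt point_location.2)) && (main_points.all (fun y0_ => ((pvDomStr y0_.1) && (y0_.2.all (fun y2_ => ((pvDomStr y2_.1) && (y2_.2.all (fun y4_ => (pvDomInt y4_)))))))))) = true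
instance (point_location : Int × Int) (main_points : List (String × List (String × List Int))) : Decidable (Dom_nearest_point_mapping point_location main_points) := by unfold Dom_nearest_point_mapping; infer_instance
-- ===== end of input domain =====

-- B replaces A's two parallel lists + min() + list.index() scheme by a single pass keeping only the running best (key, distance); same first-minimum tie-breaking (objective: simpler).


-- ===== PORT A =====
-- distance(x, y): x is the 'location' list, y the point_location pair; pyGetD is exact under Pre_ (location has ≥ 2 entries)
def pvDist (x : List Int) (y : Int × Int) : Int :=
  (PySem.List.pyGetD x 0 0 - y.1) ^ 2 + (PySem.List.pyGetD x 1 0 - y.2) ^ 2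

def nearest_point_mapping (point_location : Int × Int) (main_points : List (String × List (String × List Int))) : String :=
  -- for point, point_data in main_points.items(): build point_keys and point_dis
  let st := (PySem.Dict.ofList main_points).items.foldl
    (fun (acc : List String × List Int) e =>
      let location := (PySem.Dict.ofList e.2).getD "location" []   -- point_data['location'] (default unreachable under Pre_)
      let dis := pvDist location point_location
      (acc.1 ++ [e.1], acc.2 ++ [dis])) ([], [])
  -- idx = point_dis.index(min(point_dis)); return point_keys[idx]
  let idx := (PySem.List.index? st.2 ((PySem.List.min? st.2 (fun y => y)).getD 0)).getD 0
  PySem.List.pyGetD st.1 (idx : Int) ""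

-- ===== PORT B =====
def nearest_point_mapping_alt (point_location : Int × Int) (main_points : List (String × List (String × List Int))) : String :=
  -- single pass: best = None, replaced whenever dis < best_dis (strict, so first minimum wins)
  let best := (PySem.Dict.ofList main_points).items.foldl
    (fun (best : Option (String × Int)) e =>
      let dis := pvDist ((PySem.Dict.ofList e.2).getD "location" []) point_location
      match best with
      | none => some (e.1, dis)
      | some b => if dis < b.2 then some (e.1, dis) else some b) none
  match best with
  | some b => b.1
  | none => ""   -- unreachable under Pre_ (Source B returns None here; A raises)

-- ===== PRECONDITION & SPEC =====
-- Pre_ excludes exactly the inputs where Python A raises: the empty dict (min of an empty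
-- list → ValueError), an entry without a 'location' key (KeyError), or a location list with
-- fewer than 2 elements (IndexError).
def Pre_nearest_point_mapping (point_location : Int × Int) (main_points : List (String × List (String × List Int))) : Prop :=
  (PySem.Dict.ofList main_points).items ≠ [] ∧
  ∀ e ∈ (PySem.Dict.ofList main_points).items,
    (PySem.Dict.ofList e.2).get? "location" ≠ none ∧
    2 ≤ (((PySem.Dict.ofList e.2).get? "location").getD []).length
instance (point_location : Int × Int) (main_points : List (String × List (String × List Int))) : Decidable (Pre_nearest_point_mapping point_location main_points) := by unfold Pre_nearest_point_mapping; infer_instance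

def pvWitness_nearest_point_mapping : (Int × Int) × (List (String × List (String × List Int))) :=
  ((0, 0), [("a", [("location", [1, 2])]), ("b", [("location", [3, 4])])])

def Spec_nearest_point_mapping (point_location : Int × Int) (main_points : List (String × List (String × List Int))) (out : String) : Prop := out = nearest_point_mapping_alt point_location main_points
instance (point_location : Int × Int) (main_points : List (String × List (String × List Int))) (out : String) : Decidable (Spec_nearest_point_mapping point_location main_points out) := by unfold Spec_nearest_point_mapping; infer_instance

-- ===== CLAIM (what is proved, stated in full; the proofs are below) =====
def Claim_equal_nearest_point_mapping : Prop := ∀ (point_location : Int × Int) (main_points : List (String × List (String × List Int))), Dom_nearest_point_mapping point_location main_points → Pre_nearest_point_mapping point_location main_points → Spec_nearest_point_mapping point_location main_points (nearest_point_mapping point_location main_points)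

-- ===== LEMMAS AND PROOFS =====

-- A's list-building loop produces the two parallel maps
theorem pvFoldA_eq (pl : Int × Int) :
    ∀ (l : List (String × List (String × List Int))) (ks : List String) (ds : List Int),
    l.foldl (fun (acc : List String × List Int) e =>
        let location := (PySem.Dict.ofList e.2).getD "location" []
        let dis := pvDist location pl
        (acc.1 ++ [e.1], acc.2 ++ [dis])) (ks, ds)
      = (ks ++ l.map Prod.fst,
         ds ++ l.map (fun e => pvDist ((PySem.Dict.ofList e.2).getD "location" []) pl)) := by
  intro l
  induction l with
  | nil => intro ks ds; simp
  | cons x t ih => intro ks ds; simp [List.foldl, ih]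

-- B's option fold, once the accumulator is some, is a plain pair fold over the mapped pairs
theorem pvFoldB_eq (pl : Int × Int) :
    ∀ (l : List (String × List (String × List Int))) (a : String × Int),
    l.foldl (fun (best : Option (String × Int)) e =>
        let dis := pvDist ((PySem.Dict.ofList e.2).getD "location" []) pl
        match best with
        | none => some (e.1, dis)
        | some b => if dis < b.2 then some (e.1, dis) else some b) (some a)
      = some ((l.map (fun e => (e.1, pvDist ((PySem.Dict.ofList e.2).getD "location" []) pl))).foldl
          (fun b p => if p.2 < b.2 then p else b) a) := by
  intro l
  induction l with
  | nil => intro a; simp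
  | cons x t ih =>
    intro a
    simp only [List.foldl, List.map]
    by_cases h : pvDist ((PySem.Dict.ofList x.2).getD "location" []) pl < a.2 <;>
      simp [h, ih]

-- the core: "index of the first minimum in the distance list" picks the same element
-- as the running-best fold with strict '<'
theorem pvPick_eq :
    ∀ (q : List (String × Int)) (x : String × Int),
    PySem.List.pyGetD ((x :: q).map Prod.fst)
        (((PySem.List.index? ((x :: q).map Prod.snd)
            ((PySem.List.min? ((x :: q).map Prod.snd) (fun y => y)).getD 0)).getD 0 : Nat) : Int) ""
      = (q.foldl (fun b p => if p.2 < b.2 then p else b) x).1 := by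
  intro q
  induction q with
  | nil =>
    intro x
    simp [PySem.List.min?_id_cons]
  | cons y t ih =>
    intro x
    simp only [List.map_cons, List.foldl_cons]
    have ihy := ih y
    have ihx := ih x
    simp only [List.map_cons] at ihy ihx
    by_cases h : y.2 < x.2
    · -- head x is beaten by y: x.2 is strictly above the minimum, so index skips it
      have hmin : (PySem.List.min? (x.2 :: y.2 :: t.map Prod.snd) (fun y => y))
          = PySem.List.min? (y.2 :: t.map Prod.snd) (fun y => y) := by
        rw [PySem.List.min?_id_cons, PySem.List.min?_id_cons]
        simp only [List.foldl_cons]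
        have : min x.2 y.2 = y.2 := by omega
        rw [this]
      obtain ⟨m, hm⟩ : ∃ m, PySem.List.min? (y.2 :: t.map Prod.snd) (fun y => y) = some m := by
        simp [PySem.List.min?_id_cons]
      have hmle : m ≤ y.2 := PySem.List.min?_isMin hm y.2 (by simp)
      have hne : x.2 ≠ m := by omega
      have hmem : m ∈ y.2 :: t.map Prod.snd := PySem.List.min?_mem hm
      obtain ⟨j, hj⟩ : ∃ j, PySem.List.index? (y.2 :: t.map Prod.snd) m = some j :=
        Option.isSome_iff_exists.1
          ((PySem.List.index?_isSome_iff (y.2 :: t.map Prod.snd) m).2 hmem)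
      have hstep : PySem.List.index? (x.2 :: y.2 :: t.map Prod.snd) m = some (j + 1) := by
        rw [PySem.List.index?_cons_of_ne _ hne, hj]; rfl
      rw [hmin, hm]
      simp only [Option.getD_some]
      rw [hstep]
      rw [hm, Option.getD_some, hj] at ihy
      simp only [Option.getD_some, PySem.List.pyGetD_natCast] at ihy ⊢
      rw [if_pos h]
      simpa using ihy
    · -- head x survives y: the whole list has the same min and pick as without y
      have hminxy : min x.2 y.2 = x.2 := by omega
      have hmin : (PySem.List.min? (x.2 :: y.2 :: t.map Prod.snd) (fun y => y))
          = PySem.List.min? (x.2 :: t.map Prod.snd) (fun y => y) := by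
        rw [PySem.List.min?_id_cons, PySem.List.min?_id_cons]
        simp only [List.foldl_cons]
        rw [hminxy]
      obtain ⟨m, hm⟩ : ∃ m, PySem.List.min? (x.2 :: t.map Prod.snd) (fun y => y) = some m := by
        simp [PySem.List.min?_id_cons]
      have hxle : m ≤ x.2 := PySem.List.min?_isMin hm x.2 (by simp)
      rw [hm] at ihx
      simp only [Option.getD_some, PySem.List.pyGetD_natCast] at ihx
      rw [hmin, hm]
      simp only [Option.getD_some]
      rw [if_neg h]
      by_cases hx : x.2 = m
      · -- minimum already at the head: both lists index 0
        have h1 : PySem.List.index? (x.2 :: y.2 :: t.map Prod.snd) m = some 0 := by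
          rw [← hx]; exact PySem.List.index?_cons_self _ _
        have h2 : PySem.List.index? (x.2 :: t.map Prod.snd) m = some 0 := by
          rw [← hx]; exact PySem.List.index?_cons_self _ _
        rw [h1]
        rw [h2] at ihx
        simp only [Option.getD_some, PySem.List.pyGetD_natCast] at ihx ⊢
        simpa using ihx
      · -- minimum strictly below x.2 (hence below y.2): both indices skip their heads equally
        have hy : y.2 ≠ m := by omega
        have hmem : m ∈ x.2 :: t.map Prod.snd := PySem.List.min?_mem hm
        have hmemt : m ∈ t.map Prod.snd := by
          rcases List.mem_cons.1 hmem with h' | h'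
          · exact absurd h'.symm hx
          · exact h'
        obtain ⟨j, hj⟩ : ∃ j, PySem.List.index? (t.map Prod.snd) m = some j :=
          Option.isSome_iff_exists.1
            ((PySem.List.index?_isSome_iff (t.map Prod.snd) m).2 hmemt)
        have h1 : PySem.List.index? (x.2 :: y.2 :: t.map Prod.snd) m = some (j + 1 + 1) := by
          rw [PySem.List.index?_cons_of_ne _ hx, PySem.List.index?_cons_of_ne _ hy, hj]; rfl
        have h2 : PySem.List.index? (x.2 :: t.map Prod.snd) m = some (j + 1) := by
          rw [PySem.List.index?_cons_of_ne _ hx, hj]; rfl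
        rw [h1]
        rw [h2] at ihx
        simp only [Option.getD_some, PySem.List.pyGetD_natCast, List.getD_cons_succ] at ihx ⊢
        simpa using ihx

-- ===== VERDICT (by name: the statement is the Claim_ definition above) =====
theorem nearest_point_mapping_spec : Claim_equal_nearest_point_mapping := by
  intro pl mps _ hpre
  unfold Spec_nearest_point_mapping nearest_point_mapping nearest_point_mapping_alt
  obtain ⟨hne, -⟩ := hpre
  rcases hitems : (PySem.Dict.ofList mps).items with _ | ⟨x, l⟩
  · exact absurd hitems hne
  · simp only [List.foldl]
    rw [pvFoldA_eq, pvFoldB_eq]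
    simp only [List.nil_append]
    have := pvPick_eq (l.map (fun e => (e.1, pvDist ((PySem.Dict.ofList e.2).getD "location" []) pl)))
      (x.1, pvDist ((PySem.Dict.ofList x.2).getD "location" []) pl)
    simp only [List.map_cons, List.map_map] at this
    exact this
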